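-- pv_equiv track=rewrite | github.com/qeedquan/challenges | codeforces/1352A-sum-of-round-numbers.py | rounds
-- ===== SOURCE A (Python) =====
-- def rounds(n):
--     r = []
--     p = 1
--     while n > 0:
--         d = n % 10
--         if d != 0:
--             r.append(d*p)
--         p *= 10
--         n //= 10
--
--     return r[::-1]
-- ===== SOURCE B (Python) =====
-- def rounds(n):
--     # Recursive decomposition: most-significant part first, so no final reversal.
--     if n <= 0:
--         return []
--     d = n % 10
--     return [x * 10 for x in rounds(n // 10)] + ([d] if d != 0 else [])
-- ===== Notes on version B (the rewrite author's own statement) =====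
-- stated objective: simpler
-- what changed: Replaces the while-loop that tracks a place-value accumulator and builds the list least-significant-first followed by a full reversal with a direct structural recursion on the quotient that scales the recursive result by the base and emits digits most-significant-first, so neither a place accumulator nor the final reversal exists.
import Mathlib
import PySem

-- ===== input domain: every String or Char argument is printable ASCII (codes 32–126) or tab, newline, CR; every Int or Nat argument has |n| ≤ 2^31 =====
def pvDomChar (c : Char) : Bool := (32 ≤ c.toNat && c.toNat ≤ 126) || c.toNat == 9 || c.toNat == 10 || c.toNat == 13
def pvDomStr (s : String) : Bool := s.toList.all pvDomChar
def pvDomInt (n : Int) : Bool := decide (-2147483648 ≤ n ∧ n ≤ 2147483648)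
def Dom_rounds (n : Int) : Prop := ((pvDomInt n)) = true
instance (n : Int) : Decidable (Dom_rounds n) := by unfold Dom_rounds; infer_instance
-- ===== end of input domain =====

-- B replaces A's place-value accumulator and final reversal by a structural recursion
-- on n // 10 that scales the recursive result by 10 (objective: simpler).

-- termination helper for both ports' recursion on n // 10
theorem pv_floordiv10_lt (n : Int) (h : 0 < n) :
    (PySem.Int.floordiv n 10).toNat < n.toNat := by
  rw [PySem.Int.floordiv_eq_ediv_of_pos (by omega)]
  omega

-- ===== PORT A =====
-- the while-loop of A: state (n, p, r)
def roundsLoop (n p : Int) (r : List Int) : List Int :=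
  if h : 0 < n then
    roundsLoop (PySem.Int.floordiv n 10) (p * 10)
      (if PySem.Int.mod n 10 ≠ 0 then r ++ [PySem.Int.mod n 10 * p] else r)
  else r
termination_by n.toNat
decreasing_by exact pv_floordiv10_lt n h

-- r[::-1] is exactly List.reverse (PySem.List.slice?_none_none_neg_one)
def rounds (n : Int) : List Int := (roundsLoop n 1 []).reverse

-- ===== PORT B =====
def rounds_alt (n : Int) : List Int :=
  if h : n ≤ 0 then []
  else
    (rounds_alt (PySem.Int.floordiv n 10)).map (· * 10) ++
      (if PySem.Int.mod n 10 ≠ 0 then [PySem.Int.mod n 10] else [])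
termination_by n.toNat
decreasing_by exact pv_floordiv10_lt n (by omega)

-- ===== PRECONDITION & SPEC =====
def Spec_rounds (n : Int) (out : List Int) : Prop := out = rounds_alt n
instance (n : Int) (out : List Int) : Decidable (Spec_rounds n out) := by unfold Spec_rounds; infer_instance

-- ===== CLAIM (what is proved, stated in full; the proofs are below) =====
def Claim_equal_rounds : Prop := ∀ (n : Int), Dom_rounds n → Spec_rounds n (rounds n)

-- ===== LEMMAS AND PROOFS =====

-- loop invariant: the loop appends, least-significant-first, exactly the reverse of B's
-- (p-scaled) result to the accumulator
theorem roundsLoop_eq (k : Nat) : ∀ (n p : Int) (r : List Int), n.toNat ≤ k →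
    roundsLoop n p r = r ++ ((rounds_alt n).map (· * p)).reverse := by
  induction k with
  | zero =>
    intro n p r hle
    have hn : ¬ 0 < n := by omega
    rw [roundsLoop, rounds_alt]
    simp [hn, show n ≤ 0 by omega]
  | succ k ih =>
    intro n p r hle
    by_cases hn : 0 < n
    · have hrec : (PySem.Int.floordiv n 10).toNat ≤ k := by
        have := pv_floordiv10_lt n hn; omega
      rw [roundsLoop, dif_pos hn]
      conv_rhs => rw [rounds_alt, dif_neg (show ¬ n ≤ 0 by omega)]
      rw [ih _ _ _ hrec]
      by_cases hd : PySem.Int.mod n 10 ≠ 0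
      · rw [if_pos hd, if_pos hd]
        simp [List.map_map, Function.comp_def, List.append_assoc,
          mul_comm, mul_left_comm]
      · rw [if_neg hd, if_neg hd]
        simp [List.map_map, Function.comp_def, mul_comm, mul_left_comm]
    · rw [roundsLoop, rounds_alt]
      simp [hn, show n ≤ 0 by omega]

-- ===== VERDICT (by name: the statement is the Claim_ definition above) =====
theorem rounds_spec : Claim_equal_rounds := by
  intro n _
  unfold Spec_rounds rounds
  rw [roundsLoop_eq n.toNat n 1 [] (le_refl _)]
  simp
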